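-- pv_equiv track=rewrite | github.com/Luzhenyan/verl_memagent | verl/utils/reward_score/segmented_reading.py | _is_system_message
-- ===== SOURCE A (Python) =====
-- def _is_system_message(line: str) -> bool:
--     """检查是否是系统消息"""
--     system_prefixes = [
--         "User:", "user:", "USER:",
--         "Assistant:", "assistant:", "ASSISTANT:",
--         "Tool:", "tool:", "TOOL:",
--         "System:", "system:", "SYSTEM:",
--         "Human:", "human:", "HUMAN:",
--         "AI:", "ai:",
--     ]
--     return any(line.startswith(prefix) for prefix in system_prefixes)
-- ===== SOURCE B (Python) =====
-- _ROLE_SET = {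
--     "User", "user", "USER",
--     "Assistant", "assistant", "ASSISTANT",
--     "Tool", "tool", "TOOL",
--     "System", "system", "SYSTEM",
--     "Human", "human", "HUMAN",
--     "AI", "ai",
-- }
--
-- def _is_system_message(line: str) -> bool:
--     """检查是否是系统消息"""
--     prefix, sep, _ = line.partition(":")
--     return sep == ":" and prefix in _ROLE_SET
-- ===== Notes on version B (the rewrite author's own statement) =====
-- stated objective: alternative
-- what changed: Instead of testing the line against all 17 role prefixes one by one, B parses the line once with partition(':') and checks the text before the first colon against a constant set of role tokens.
import Mathlib
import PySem

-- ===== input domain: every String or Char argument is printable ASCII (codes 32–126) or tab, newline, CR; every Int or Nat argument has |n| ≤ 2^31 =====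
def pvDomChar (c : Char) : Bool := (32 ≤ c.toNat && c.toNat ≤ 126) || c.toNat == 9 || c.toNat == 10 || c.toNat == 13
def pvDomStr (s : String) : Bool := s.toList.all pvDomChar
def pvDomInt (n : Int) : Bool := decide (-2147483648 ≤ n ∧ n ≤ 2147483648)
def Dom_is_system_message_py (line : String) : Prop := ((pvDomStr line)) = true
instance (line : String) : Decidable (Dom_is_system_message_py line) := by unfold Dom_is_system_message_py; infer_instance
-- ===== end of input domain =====

-- B replaces the 17-prefix scan by one partition at the first ':' plus a set lookup of the role token (objective: alternative single-parse algorithm).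

-- ===== PORT A =====
def systemPrefixes : List String :=
  ["User:", "user:", "USER:",
   "Assistant:", "assistant:", "ASSISTANT:",
   "Tool:", "tool:", "TOOL:",
   "System:", "system:", "SYSTEM:",
   "Human:", "human:", "HUMAN:",
   "AI:", "ai:"]

def is_system_message_py (line : String) : Bool :=
  systemPrefixes.any (fun prefix_ => PySem.Str.startswith line prefix_)

-- ===== PORT B =====
-- the Python set _ROLE_SET (distinct string literals), held as its list of distinct elements
def roleSet : List (List Char) :=
  ["User".toList, "user".toList, "USER".toList,
   "Assistant".toList, "assistant".toList, "ASSISTANT".toList,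
   "Tool".toList, "tool".toList, "TOOL".toList,
   "System".toList, "system".toList, "SYSTEM".toList,
   "Human".toList, "human".toList, "HUMAN".toList,
   "AI".toList, "ai".toList]

-- line.partition(":"): prefix = chars before the first ':', sep = ":" iff a ':' occurs
def is_system_message_py_alt (line : String) : Bool :=
  let cs := line.toList
  let prefix_ := cs.takeWhile (fun c => c ≠ ':')
  let sepFound := cs.contains ':'
  sepFound && roleSet.contains prefix_

-- ===== PRECONDITION & SPEC =====
def Spec_is_system_message_py (line : String) (out : Bool) : Prop := out = is_system_message_py_alt line
instance (line : String) (out : Bool) : Decidable (Spec_is_system_message_py line out) := by unfold Spec_is_system_message_py; infer_instance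

-- ===== CLAIM (what is proved, stated in full; the proofs are below) =====
def Claim_equal_is_system_message_py : Prop := ∀ (line : String), Dom_is_system_message_py line → Spec_is_system_message_py line (is_system_message_py line)

-- ===== LEMMAS AND PROOFS =====

-- a colon-free token r followed by ':' is a prefix of cs iff cs contains a ':' and the part before the first ':' is exactly r
theorem prefix_colon_iff (r : List Char) (h : ':' ∉ r) (cs : List Char) :
    (r ++ [':']) <+: cs ↔ (':' ∈ cs ∧ cs.takeWhile (fun c => c ≠ ':') = r) := by
  induction r generalizing cs with
  | nil =>
    cases cs with
    | nil => simp
    | cons c t =>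
      by_cases hc : c = ':'
      · subst hc; simp
      · simp [List.cons_prefix_cons, hc, Ne.symm hc]
  | cons a r ih =>
    have ha : a ≠ ':' := fun e => h (e ▸ List.mem_cons_self)
    have h' : ':' ∉ r := fun e => h (List.mem_cons_of_mem _ e)
    cases cs with
    | nil => simp
    | cons c t =>
      by_cases hca : c = a
      · subst hca
        simp [List.cons_prefix_cons, ha, ih h', Ne.symm ha]
      · constructor
        · intro hp
          exact (hca (List.cons_prefix_cons.mp hp).1.symm).elim
        · rintro ⟨-, htw⟩
          by_cases hc : c = ':'
          · simp [hc] at htw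
          · simp [hc] at htw
            exact absurd htw.1 hca

theorem startswith_colon (cs r : List Char) (h : ':' ∉ r) :
    PySem.Chars.startswith cs (r ++ [':'])
      = (cs.contains ':' && (cs.takeWhile (fun c => c ≠ ':') == r)) := by
  rw [Bool.eq_iff_iff, PySem.Chars.startswith_iff, prefix_colon_iff r h cs]
  simp

-- ===== VERDICT (by name: the statement is the Claim_ definition above) =====
theorem is_system_message_py_spec : Claim_equal_is_system_message_py := by
  intro line _
  unfold Spec_is_system_message_py is_system_message_py is_system_message_py_alt
  simp only [systemPrefixes, roleSet, List.any_cons, List.any_nil,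
    PySem.Str.startswith_eq]
  have sw := fun r h => startswith_colon line.toList r h
  rw [show ("User:" : String).toList = "User".toList ++ [':'] from rfl,
      show ("user:" : String).toList = "user".toList ++ [':'] from rfl,
      show ("USER:" : String).toList = "USER".toList ++ [':'] from rfl,
      show ("Assistant:" : String).toList = "Assistant".toList ++ [':'] from rfl,
      show ("assistant:" : String).toList = "assistant".toList ++ [':'] from rfl,
      show ("ASSISTANT:" : String).toList = "ASSISTANT".toList ++ [':'] from rfl,
      show ("Tool:" : String).toList = "Tool".toList ++ [':'] from rfl,
      show ("tool:" : String).toList = "tool".toList ++ [':'] from rfl,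
      show ("TOOL:" : String).toList = "TOOL".toList ++ [':'] from rfl,
      show ("System:" : String).toList = "System".toList ++ [':'] from rfl,
      show ("system:" : String).toList = "system".toList ++ [':'] from rfl,
      show ("SYSTEM:" : String).toList = "SYSTEM".toList ++ [':'] from rfl,
      show ("Human:" : String).toList = "Human".toList ++ [':'] from rfl,
      show ("human:" : String).toList = "human".toList ++ [':'] from rfl,
      show ("HUMAN:" : String).toList = "HUMAN".toList ++ [':'] from rfl,
      show ("AI:" : String).toList = "AI".toList ++ [':'] from rfl,
      show ("ai:" : String).toList = "ai".toList ++ [':'] from rfl,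
      sw _ (by decide), sw _ (by decide), sw _ (by decide), sw _ (by decide),
      sw _ (by decide), sw _ (by decide), sw _ (by decide), sw _ (by decide),
      sw _ (by decide), sw _ (by decide), sw _ (by decide), sw _ (by decide),
      sw _ (by decide), sw _ (by decide), sw _ (by decide), sw _ (by decide),
      sw _ (by decide)]
  cases h : line.toList.contains ':' <;>
    simp [List.contains_eq_mem, List.mem_cons, beq_eq_decide, eq_comm]
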